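-- pv_equiv track=rewrite | github.com/ajjoona-git/algorithm-inclass | 08-stack2-1/0000/0000.py | num_first
-- ===== SOURCE A (Python) =====
-- def num_first(expression):
--     """수식 문자열을 읽어서 피연산자는 바로 출력하고 연산자는 스택에 push 하여
--     수식이 끝나면 스택의 남아있는 연산자를 모두 pop하여 출력하는 함수"""
--     stack = []
--     result = []
--
--     for token in expression:
--         # 1. 연산자(사칙연산)
--         if token in '+-*/':
--             stack.append(token)
--         # 2. 피연산자
--         else:
--             result.append(token)
--
--     # 수식이 끝나고 스택에 남아있는 연산자를 모두 pop
--     while stack: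
--         result.append(stack.pop())
--
--     return ''.join(result)
-- ===== SOURCE B (Python) =====
-- def num_first(expression):
--     # Single pass writing into a preallocated output array with two pointers:
--     # operands fill from the front, operators fill from the back (so they end
--     # up in reverse encounter order). No stack, no pop loop, no reversal.
--     n = len(expression)
--     out = [None] * n
--     lo, hi = 0, n - 1
--     for ch in expression:
--         if ch in '+-*/':
--             out[hi] = ch
--             hi -= 1
--         else:
--             out[lo] = ch
--             lo += 1
--     return ''.join(out)
-- ===== Notes on version B (the rewrite author's own statement) =====
-- stated objective: alternative
-- what changed: Replaces the stack plus trailing while-pop loop by a single pass that writes characters into a preallocated output array via two pointers (operands from the front, operators from the back), so no stack, no second loop and no reversal exist.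
import Mathlib
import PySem

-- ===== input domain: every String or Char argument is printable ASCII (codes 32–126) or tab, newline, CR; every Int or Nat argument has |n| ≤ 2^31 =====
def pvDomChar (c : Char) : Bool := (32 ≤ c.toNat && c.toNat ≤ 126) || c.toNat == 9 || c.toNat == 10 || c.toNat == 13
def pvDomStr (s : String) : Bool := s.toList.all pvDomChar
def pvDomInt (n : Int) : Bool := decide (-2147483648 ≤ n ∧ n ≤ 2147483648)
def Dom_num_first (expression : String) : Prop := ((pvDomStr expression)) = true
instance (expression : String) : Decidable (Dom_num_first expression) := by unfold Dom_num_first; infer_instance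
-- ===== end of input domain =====

-- B replaces A's stack + while-pop loop by one pass writing into a preallocated
-- output array with two pointers (operands from the front, operators from the back);
-- objective: alternative (same O(n) cost, no stack / second loop / reversal).

-- ===== PORT A =====
def pvIsOp (c : Char) : Bool := "+-*/".toList.contains c   -- port of `token in '+-*/'` for a single char

-- the trailing `while stack: result.append(stack.pop())` (stack head = top)
def pvPopAll : List Char → List Char → List Char
  | [], result => result
  | c :: st, result => pvPopAll st (result ++ [c])

def num_first (expression : String) : String :=
  let p := expression.toList.foldl
    (fun (acc : List Char × List Char) token =>
      if pvIsOp token then (token :: acc.1, acc.2) else (acc.1, acc.2 ++ [token]))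
    ([], [])
  String.mk (pvPopAll p.1 p.2)

-- ===== PORT B =====
-- the for-loop of Source B: state = (out, lo, hi); indices are Python ints (Int here);
-- `.toNat` is safe because the written index is provably nonnegative (lo ≥ 0, and
-- out[hi] is only written while hi ≥ 0, as the proofs below establish)
def pvPlace : List Char → List Char → Int → Int → List Char
  | [], out, _, _ => out
  | ch :: cs, out, lo, hi =>
    if pvIsOp ch then pvPlace cs (out.set hi.toNat ch) lo (hi - 1)
    else pvPlace cs (out.set lo.toNat ch) (lo + 1) hi

def num_first_alt (expression : String) : String :=
  let n := expression.toList.length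
  -- `[None] * n`: placeholder ' ' (every slot is overwritten before the join)
  String.mk (pvPlace expression.toList (List.replicate n ' ') 0 ((n : Int) - 1))

-- ===== PRECONDITION & SPEC =====
def Spec_num_first (expression : String) (out : String) : Prop := out = num_first_alt expression
instance (expression : String) (out : String) : Decidable (Spec_num_first expression out) := by unfold Spec_num_first; infer_instance

-- ===== CLAIM (what is proved, stated in full; the proofs are below) =====
def Claim_equal_num_first : Prop := ∀ (expression : String), Dom_num_first expression → Spec_num_first expression (num_first expression)

-- ===== LEMMAS AND PROOFS =====
theorem pvPopAll_eq (st res : List Char) : pvPopAll st res = res ++ st := by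
  induction st generalizing res with
  | nil => simp [pvPopAll]
  | cons c t ih => simp [pvPopAll, ih]

theorem pvFold_eq (cs st res : List Char) :
    cs.foldl (fun (acc : List Char × List Char) token =>
        if pvIsOp token then (token :: acc.1, acc.2) else (acc.1, acc.2 ++ [token])) (st, res)
      = ((cs.filter pvIsOp).reverse ++ st, res ++ cs.filter (fun c => !pvIsOp c)) := by
  induction cs generalizing st res with
  | nil => simp
  | cons c t ih =>
    by_cases h : pvIsOp c = true <;> simp [List.foldl, h, ih]

-- the two-pointer loop fills the gap out[lo..hi] with operands (front) and
-- reversed operators (back)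
theorem pvPlace_eq (cs : List Char) : ∀ (out : List Char) (lo hi : Int),
    0 ≤ lo → lo + cs.length = hi + 1 → hi < out.length →
    pvPlace cs out lo hi
      = out.take lo.toNat ++ cs.filter (fun c => !pvIsOp c)
          ++ (cs.filter pvIsOp).reverse ++ out.drop (hi + 1).toNat := by
  induction cs with
  | nil =>
    intro out lo hi hlo hlen hhi
    simp only [List.length_nil, Int.natCast_zero, add_zero] at hlen
    subst hlen
    simp [pvPlace, List.take_append_drop]
  | cons c cs ih =>
    intro out lo hi hlo hlen hhi
    have hlohi : lo ≤ hi := by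
      have : (0:Int) ≤ cs.length := Int.natCast_nonneg _
      simp only [List.length_cons] at hlen; push_cast at hlen; omega
    have hhi0 : 0 ≤ hi := le_trans hlo hlohi
    have hlt : lo.toNat < out.length := by
      have : lo < (out.length : Int) := lt_of_le_of_lt hlohi hhi
      omega
    have hhilt : hi.toNat < out.length := by omega
    by_cases h : pvIsOp c = true
    · -- operator: write at hi, move hi left
      have hrec := ih (out.set hi.toNat c) lo (hi - 1) hlo
        (by simp only [List.length_cons] at hlen; push_cast at hlen ⊢; omega)
        (by simp only [List.length_set]; omega)
      simp only [pvPlace, h, if_pos, hrec]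
      have h1 : (hi - 1 + 1).toNat = hi.toNat := by omega
      have h2 : (hi + 1).toNat = hi.toNat + 1 := by omega
      rw [h1, h2]
      have htake : (out.set hi.toNat c).take lo.toNat = out.take lo.toNat := by
        rw [List.take_set, List.set_eq_of_length_le (by simp [List.length_take]; omega)]
      have hdrop : (out.set hi.toNat c).drop hi.toNat = c :: out.drop (hi.toNat + 1) := by
        rw [List.drop_set, if_neg (lt_irrefl _)]
        rw [List.drop_eq_getElem_cons hhilt, Nat.sub_self, List.set_cons_zero]
      rw [htake, hdrop]
      simp [h]
    · -- operand: write at lo, move lo right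
      have hrec := ih (out.set lo.toNat c) (lo + 1) hi (by omega)
        (by simp only [List.length_cons] at hlen; push_cast at hlen ⊢; omega)
        (by simp only [List.length_set]; omega)
      simp only [pvPlace, h, if_neg, Bool.not_eq_true, hrec]
      have h1 : (lo + 1).toNat = lo.toNat + 1 := by omega
      rw [h1]
      have htake : (out.set lo.toNat c).take (lo.toNat + 1) = out.take lo.toNat ++ [c] := by
        have hlenTake : (out.take lo.toNat).length = lo.toNat :=
          List.length_take_of_le (le_of_lt hlt)
        rw [List.set_eq_take_append_cons_drop, if_pos hlt, List.take_append,
          List.take_of_length_le (by omega), hlenTake, Nat.add_sub_cancel_left]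
        simp
      have hdrop : (out.set lo.toNat c).drop (hi + 1).toNat = out.drop (hi + 1).toNat := by
        rw [List.drop_set, if_pos (by omega)]
      rw [htake, hdrop]
      simp [h]

-- ===== VERDICT (by name: the statement is the Claim_ definition above) =====
theorem num_first_spec : Claim_equal_num_first := by
  intro expression _
  show _ = _
  simp only [num_first, num_first_alt, pvFold_eq, pvPopAll_eq]
  rw [pvPlace_eq _ _ 0 _ le_rfl (by omega)
    (by simp only [List.length_replicate]; omega)]
  simp
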